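-- pv_equiv track=rewrite | github.com/aehyemin/algorithm_solve | 2026_02/FrogRiverOne.py | solution
-- ===== SOURCE A (Python) =====
-- def solution(X, A):
--     #개구리는 0에 있음, 근데 x+1로 가고싶음
--     #배열 A가 주어짐. K초에 나뭇잎이 떨어짐
--     #한번에 한개만 건널 수 있음. 즉, 1 .. X 까지 나뭇잎이 전부 있어야함
--     #조건을 만족하는 가장 빠른 초
--     #X가 5면 len(set) = 5면?
--
--     seen = set()
--     for i in range(len(A)):
--         if A[i] in seen:
--             continue
--         else:
--             if A[i] <= X:
--                 seen.add(A[i])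
--
--         if len(seen) == X:
--             return i
--     return -1
-- ===== SOURCE B (Python) =====
-- def solution(X, A):
--     # Binary search for the shortest prefix of A that already contains X
--     # distinct values not exceeding X; the answer is the index of the last
--     # leaf of that prefix (prefix length minus one), or -1 if even the whole
--     # list never reaches X such values.
--     def covered(m):
--         return len({v for v in A[:m] if v <= X}) >= X
--
--     if not covered(len(A)):
--         return -1
--     lo, hi = 0, len(A)
--     while lo < hi:
--         mid = (lo + hi) // 2
--         if covered(mid):
--             hi = mid
--         else:
--             lo = mid + 1
--     return lo - 1
-- ===== Notes on version B (the rewrite author's own statement) =====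
-- stated objective: alternative
-- what changed: A does a single forward scan growing a set of distinct values <= X and early-returns when the set size hits X; B instead binary-searches over prefix lengths for the shortest prefix containing X distinct values <= X (an O(n) coverage test per probe) and returns that prefix's last index.
-- intended difference: When X == 0 and A starts with a positive element, A returns 0 (its size-0 check happens to pass only because the first element exceeds X and leaves the set empty, while a leading non-positive element makes it return -1), whereas B uniformly returns -1 for the vacuous requirement X <= 0; B's consistent value is the intended one on this degenerate corner. — e.g. on solution(0, [1]): A returns 0, B returns -1
import Mathlib
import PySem

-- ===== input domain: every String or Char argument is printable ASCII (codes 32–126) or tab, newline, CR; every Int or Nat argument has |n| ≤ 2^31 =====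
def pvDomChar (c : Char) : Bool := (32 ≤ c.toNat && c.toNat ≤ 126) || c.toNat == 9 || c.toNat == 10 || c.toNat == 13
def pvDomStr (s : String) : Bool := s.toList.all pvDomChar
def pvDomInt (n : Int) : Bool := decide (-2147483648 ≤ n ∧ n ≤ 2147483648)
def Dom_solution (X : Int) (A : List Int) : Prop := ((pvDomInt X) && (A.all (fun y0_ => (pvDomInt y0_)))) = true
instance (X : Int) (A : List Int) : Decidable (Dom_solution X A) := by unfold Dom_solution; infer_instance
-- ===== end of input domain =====

-- B replaces A's early-returning set-growing scan by a binary search over prefix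
-- lengths for the shortest prefix containing X distinct values <= X; on the corner
-- X = 0 with a positive first element (D_ below) B returns -1 where A returns 0.

-- ===== PORT A =====
-- 'for i in range(len(A)): … A[i] …' iterated as enumerate(A); 'continue' = first branch
def solutionGo (X : Int) (seen : PySem.Set Int) : List (Int × Int) → Int
  | [] => -1
  | (i, v) :: rest =>
    if PySem.Set.contains seen v then solutionGo X seen rest
    else
      let seen' := if v ≤ X then PySem.Set.add seen v else seen
      if (PySem.Set.len seen' : Int) = X then i else solutionGo X seen' rest

def solution (X : Int) (A : List Int) : Int :=
  solutionGo X PySem.Set.empty (PySem.List.enumerate A)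

-- ===== PORT B =====
-- covered(m) = len({v for v in A[:m] if v <= X}) >= X
def covered (X : Int) (A : List Int) (m : Int) : Bool :=
  decide (X ≤ ((PySem.Set.len (PySem.Set.ofList
      ((PySem.List.slice A none (some m)).filter (fun v => decide (v ≤ X))))) : Int))

-- the 'while lo < hi' bisection loop; the fuel argument only makes it total
-- (each pass shrinks hi - lo by at least one, so fuel = (hi - lo).toNat suffices)
def altGo (X : Int) (A : List Int) : Nat → Int → Int → Int
  | 0, lo, _hi => lo
  | fuel + 1, lo, hi =>
    if lo < hi then
      let mid := PySem.Int.floordiv (lo + hi) 2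
      if covered X A mid then altGo X A fuel lo mid else altGo X A fuel (mid + 1) hi
    else lo

def solution_alt (X : Int) (A : List Int) : Int :=
  if ¬ covered X A (A.length : Int) then -1
  else altGo X A A.length 0 (A.length : Int) - 1

-- ===== PRECONDITION & SPEC =====
-- When X == 0 and A starts with a positive element, A returns 0 (its size-0 check
-- passes only because the first element exceeds X and leaves the set empty, while a
-- leading non-positive element yields -1), whereas B uniformly returns -1 for the
-- vacuous requirement X <= 0; B's consistent value is the intended one there.
def D_solution (X : Int) (A : List Int) : Prop := X = 0 ∧ A ≠ [] ∧ 0 < A.headD 0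
instance (X : Int) (A : List Int) : Decidable (D_solution X A) := by unfold D_solution; infer_instance

def Spec_solution (X : Int) (A : List Int) (out : Int) : Prop := ¬ D_solution X A → out = solution_alt X A
instance (X : Int) (A : List Int) (out : Int) : Decidable (Spec_solution X A out) := by unfold Spec_solution; infer_instance

def pvDiffWitness_solution : Int × List Int := (0, [1])
def pvDiffWitnessOut_solution : Int × Int := (0, -1)

-- ===== CLAIM (what is proved, stated in full; the proofs are below) =====
def Claim_unchanged_solution : Prop := ∀ (X : Int) (A : List Int), Dom_solution X A → Spec_solution X A (solution X A)
def Claim_changed_solution : Prop := Dom_solution (pvDiffWitness_solution.1) (pvDiffWitness_solution.2) ∧ D_solution (pvDiffWitness_solution.1) (pvDiffWitness_solution.2) ∧ solution (pvDiffWitness_solution.1) (pvDiffWitness_solution.2) = pvDiffWitnessOut_solution.1 ∧ solution_alt (pvDiffWitness_solution.1) (pvDiffWitness_solution.2) = pvDiffWitnessOut_solution.2 ∧ pvDiffWitnessOut_solution.1 ≠ pvDiffWitnessOut_solution.2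
def Claim_exact_solution : Prop := ∀ (X : Int) (A : List Int), Dom_solution X A → D_solution X A → solution X A ≠ solution_alt X A

-- ===== LEMMAS AND PROOFS =====

-- the set A's loop carries after k steps, and the distinct-count of a prefix
def prefSet (X : Int) (A : List Int) (k : Nat) : PySem.Set Int :=
  PySem.Set.ofList ((A.take k).filter (fun v => decide (v ≤ X)))

def cnt (X : Int) (A : List Int) (k : Nat) : Nat := (prefSet X A k).length

theorem not_mem_of_not_contains (seen : PySem.Set Int) (v : Int)
    (hc : ¬ PySem.Set.contains seen v = true) : v ∉ seen :=
  fun hm => hc ((PySem.Set.contains_iff seen v).2 hm)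

theorem length_add (s : PySem.Set Int) (v : Int) :
    (PySem.Set.add s v).length = if v ∈ s then s.length else s.length + 1 := by
  rw [PySem.Set.add_eq_ite]; split <;> simp

theorem foldl_add_len_ge (v : List Int) :
    ∀ s : PySem.Set Int, s.length ≤ (v.foldl PySem.Set.add s).length := by
  induction v with
  | nil => intro s; simp
  | cons x xs ih =>
    intro s
    refine le_trans ?_ (ih (PySem.Set.add s x))
    rw [PySem.Set.add_eq_ite]; split <;> simp

theorem cnt_zero (X : Int) (A : List Int) : cnt X A 0 = 0 := rfl

theorem cnt_mono (X : Int) (A : List Int) {a b : Nat} (h : a ≤ b) : cnt X A a ≤ cnt X A b := by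
  have hsplit : A.take b = A.take a ++ (A.drop a).take (b - a) := by
    have := List.take_add (l := A) (i := a) (j := b - a)
    rwa [Nat.add_sub_cancel' h] at this
  unfold cnt prefSet
  rw [hsplit, List.filter_append]
  simp only [PySem.Set.ofList_eq_foldl]
  rw [List.foldl_append]
  exact foldl_add_len_ge _ _

theorem ofList_append_singleton (l : List Int) (a : Int) :
    PySem.Set.ofList (l ++ [a]) = PySem.Set.add (PySem.Set.ofList l) a := by
  simp only [PySem.Set.ofList_eq_foldl, List.foldl_append, List.foldl_cons, List.foldl_nil]

theorem prefSet_succ (X : Int) (A : List Int) {k : Nat} (hk : k < A.length) :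
    prefSet X A (k + 1)
      = if A[k] ≤ X then PySem.Set.add (prefSet X A k) A[k] else prefSet X A k := by
  unfold prefSet
  rw [List.take_add_one, List.getElem?_eq_getElem hk, Option.toList_some, List.filter_append]
  by_cases h : A[k] ≤ X
  · rw [if_pos h, List.filter_cons_of_pos (by simpa using h), List.filter_nil,
      ofList_append_singleton]
  · rw [if_neg h, List.filter_cons_of_neg (by simpa using h), List.filter_nil, List.append_nil]

theorem cnt_succ_le (X : Int) (A : List Int) {k : Nat} (hk : k < A.length) :
    cnt X A (k + 1) ≤ cnt X A k + 1 := by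
  unfold cnt
  rw [prefSet_succ X A hk]
  split
  · rw [length_add]; split <;> omega
  · omega

theorem prefSet_succ_of_mem (X : Int) (A : List Int) {k : Nat} (hk : k < A.length)
    (h : A[k] ∈ prefSet X A k) : prefSet X A (k + 1) = prefSet X A k := by
  rw [prefSet_succ X A hk]
  split
  · exact PySem.Set.add_of_mem h
  · rfl

theorem covered_eq (X : Int) (A : List Int) (k : Nat) :
    covered X A (k : Int) = decide (X ≤ (cnt X A k : Int)) := by
  unfold covered cnt prefSet
  rw [PySem.List.slice_to_natCast]
  rfl

-- A's loop never returns once the set is already larger than X (it only grows)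
theorem solutionGo_gt (X : Int) (xs : List (Int × Int)) :
    ∀ seen : PySem.Set Int, X < (List.length seen : Int) → solutionGo X seen xs = -1 := by
  induction xs with
  | nil => intro seen _; rfl
  | cons p rest ih =>
    intro seen h
    obtain ⟨i, v⟩ := p
    simp only [solutionGo, PySem.Set.len]
    by_cases hc : PySem.Set.contains seen v = true
    · rw [if_pos hc]; exact ih seen h
    · rw [if_neg hc]
      have hm := not_mem_of_not_contains seen v hc
      have hlen : X < ((List.length (if v ≤ X then PySem.Set.add seen v else seen)) : Int) := by
        split
        · rw [length_add, if_neg hm]; push_cast; omega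
        · exact h
      rw [if_neg (by omega)]
      exact ih _ hlen

-- A scans to -1 when even the full list holds fewer than X distinct values ≤ X
theorem goA1 (X : Int) (A : List Int) (hc : (cnt X A A.length : Int) < X) :
    ∀ (l : List Int) (k : Nat), l = A.drop k →
      solutionGo X (prefSet X A k) (PySem.List.enumerate l (k : Int)) = -1 := by
  intro l
  induction l with
  | nil => intro k _; rfl
  | cons v rest ih =>
    intro k hdrop
    have hk : k < A.length := by
      by_contra h'
      rw [List.drop_eq_nil_of_le (by omega)] at hdrop
      simp at hdrop
    have hcons : A[k] :: A.drop (k + 1) = v :: rest := by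
      rw [← List.drop_eq_getElem_cons hk, ← hdrop]
    have hv : v = A[k] := by injection hcons with h1 _; exact h1.symm
    have hrest : rest = A.drop (k + 1) := by injection hcons with _ h2; exact h2.symm
    rw [PySem.List.enumerate_cons]
    simp only [solutionGo, PySem.Set.len]
    have hkk : ((k : Int) + 1) = ((k + 1 : Nat) : Int) := by push_cast; ring
    by_cases hm : PySem.Set.contains (prefSet X A k) v = true
    · rw [if_pos hm]
      have hmem : v ∈ prefSet X A k := (PySem.Set.contains_iff _ _).1 hm
      have heq : prefSet X A (k + 1) = prefSet X A k := by
        subst hv; exact prefSet_succ_of_mem X A hk hmem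
      rw [← heq, hkk]
      exact ih (k + 1) hrest
    · rw [if_neg hm]
      have hseen : (if v ≤ X then PySem.Set.add (prefSet X A k) v else prefSet X A k)
          = prefSet X A (k + 1) := by
        rw [prefSet_succ X A hk, ← hv]
      rw [hseen]
      have hle : (cnt X A (k + 1) : Int) ≤ (cnt X A A.length : Int) := by
        exact_mod_cast cnt_mono X A (show k + 1 ≤ A.length by omega)
      have : ¬ ((List.length (prefSet X A (k + 1)) : Int) = X) := by
        have e1 : (List.length (prefSet X A (k + 1)) : Int) = (cnt X A (k + 1) : Int) := rfl
        omega
      rw [if_neg this, hkk]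
      exact ih (k + 1) hrest

-- A scans to r - 1 when r is the least prefix length with X distinct values ≤ X
theorem goA2 (X : Int) (A : List Int) (r : Nat) (hr : r ≤ A.length)
    (hhit : X ≤ (cnt X A r : Int)) (hmin : ∀ m : Nat, m < r → (cnt X A m : Int) < X) :
    ∀ (l : List Int) (k : Nat), l = A.drop k → k < r →
      solutionGo X (prefSet X A k) (PySem.List.enumerate l (k : Int)) = (r : Int) - 1 := by
  intro l
  induction l with
  | nil =>
    intro k hdrop hkr
    have : A.length ≤ k := List.drop_eq_nil_iff.mp hdrop.symm
    omega
  | cons v rest ih =>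
    intro k hdrop hkr
    have hk : k < A.length := by
      by_contra h'
      rw [List.drop_eq_nil_of_le (by omega)] at hdrop
      simp at hdrop
    have hcons : A[k] :: A.drop (k + 1) = v :: rest := by
      rw [← List.drop_eq_getElem_cons hk, ← hdrop]
    have hv : v = A[k] := by injection hcons with h1 _; exact h1.symm
    have hrest : rest = A.drop (k + 1) := by injection hcons with _ h2; exact h2.symm
    have hck : (cnt X A k : Int) < X := hmin k hkr
    rw [PySem.List.enumerate_cons]
    simp only [solutionGo, PySem.Set.len]
    have hkk : ((k : Int) + 1) = ((k + 1 : Nat) : Int) := by push_cast; ring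
    by_cases hm : PySem.Set.contains (prefSet X A k) v = true
    · rw [if_pos hm]
      have hmem : v ∈ prefSet X A k := (PySem.Set.contains_iff _ _).1 hm
      have heq : prefSet X A (k + 1) = prefSet X A k := by
        subst hv; exact prefSet_succ_of_mem X A hk hmem
      have hk1r : k + 1 < r := by
        rcases Nat.lt_or_ge (k + 1) r with h | h
        · exact h
        · exfalso
          have hreq : r = k + 1 := by omega
          have : cnt X A r = cnt X A k := by rw [hreq]; unfold cnt; rw [heq]
          rw [this] at hhit; omega
      rw [← heq, hkk]
      exact ih (k + 1) hrest hk1r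
    · rw [if_neg hm]
      have hseen : (if v ≤ X then PySem.Set.add (prefSet X A k) v else prefSet X A k)
          = prefSet X A (k + 1) := by
        rw [prefSet_succ X A hk, ← hv]
      rw [hseen]
      by_cases hk1r : k + 1 = r
      · have hstep : cnt X A (k + 1) ≤ cnt X A k + 1 := cnt_succ_le X A hk
        have hXeq : (List.length (prefSet X A (k + 1)) : Int) = X := by
          have h1 : X ≤ (cnt X A (k + 1) : Int) := by rw [hk1r]; exact hhit
          have h2 : (cnt X A (k + 1) : Int) ≤ (cnt X A k : Int) + 1 := by exact_mod_cast hstep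
          have e1 : (List.length (prefSet X A (k + 1)) : Int) = (cnt X A (k + 1) : Int) := rfl
          have e2 : (List.length (prefSet X A k) : Int) = (cnt X A k : Int) := rfl
          omega
        rw [if_pos hXeq]
        omega
      · have hk1r' : k + 1 < r := by omega
        have : ¬ ((List.length (prefSet X A (k + 1)) : Int) = X) := by
          have hlt := hmin (k + 1) hk1r'
          have e1 : (List.length (prefSet X A (k + 1)) : Int) = (cnt X A (k + 1) : Int) := rfl
          omega
        rw [if_neg this, hkk]
        exact ih (k + 1) hrest hk1r'

-- covered is monotone in the (nonnegative) prefix length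
theorem covered_mono (X : Int) (A : List Int) {m m' : Int} (h0 : 0 ≤ m) (hmm : m ≤ m')
    (hc : covered X A m = true) : covered X A m' = true := by
  have h0' : 0 ≤ m' := le_trans h0 hmm
  have hm : m = (m.toNat : Int) := (Int.toNat_of_nonneg h0).symm
  have hm' : m' = (m'.toNat : Int) := (Int.toNat_of_nonneg h0').symm
  rw [hm, covered_eq] at hc
  rw [hm', covered_eq]
  have hmono : cnt X A m.toNat ≤ cnt X A m'.toNat := cnt_mono X A (by omega)
  simp only [decide_eq_true_eq] at hc ⊢
  have : (cnt X A m.toNat : Int) ≤ (cnt X A m'.toNat : Int) := by exact_mod_cast hmono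
  omega

-- the bisection returns the least m in [lo, hi] with covered m, given covered hi
theorem altGo_spec (X : Int) (A : List Int) :
    ∀ (fuel : Nat) (lo hi : Int), 0 ≤ lo → lo ≤ hi → hi - lo ≤ (fuel : Int) →
      covered X A hi = true →
      lo ≤ altGo X A fuel lo hi ∧ altGo X A fuel lo hi ≤ hi ∧
      covered X A (altGo X A fuel lo hi) = true ∧
      ∀ m : Int, lo ≤ m → m < altGo X A fuel lo hi → covered X A m = false := by
  intro fuel
  induction fuel with
  | zero =>
    intro lo hi h0 hlh hfuel hcov
    have : lo = hi := by simp at hfuel; omega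
    subst this
    simp only [altGo]
    exact ⟨le_refl _, le_refl _, hcov, fun m h1 h2 => absurd (lt_of_le_of_lt h1 h2) (lt_irrefl _)⟩
  | succ fuel ih =>
    intro lo hi h0 hlh hfuel hcov
    simp only [altGo]
    by_cases hlt : lo < hi
    · rw [if_pos hlt]
      have hmid := PySem.Int.floordiv_two_mid_bounds (le_of_lt hlt)
      have hmlt : PySem.Int.floordiv (lo + hi) 2 < hi := by
        rw [PySem.Int.floordiv_lt_iff_lt_mul (by omega)]; omega
      have hmle : lo ≤ PySem.Int.floordiv (lo + hi) 2 := by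
        rw [PySem.Int.le_floordiv_iff_mul_le (by omega)]; omega
      set mid := PySem.Int.floordiv (lo + hi) 2 with hmiddef
      by_cases hcm : covered X A mid = true
      · rw [if_pos hcm]
        exact let ⟨p1, p2, p3, p4⟩ := ih lo mid h0 hmle (by omega) hcm
          ⟨p1, le_trans p2 (le_of_lt hmlt), p3, p4⟩
      · rw [if_neg hcm]
        obtain ⟨p1, p2, p3, p4⟩ := ih (mid + 1) hi (by omega) (by omega) (by omega) hcov
        refine ⟨le_trans (by omega) p1, p2, p3, ?_⟩
        intro m hm1 hm2
        by_cases hmm : mid + 1 ≤ m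
        · exact p4 m hmm hm2
        · have hmmid : m ≤ mid := by omega
          by_contra hmc
          have : covered X A m = true := by
            cases h : covered X A m
            · exact absurd h hmc
            · rfl
          exact (by simpa [hcm] using covered_mono X A (le_trans h0 hm1) hmmid this)
    · rw [if_neg hlt]
      have : lo = hi := by omega
      subst this
      exact ⟨le_refl _, le_refl _, hcov, fun m h1 h2 => absurd (lt_of_le_of_lt h1 h2) (lt_irrefl _)⟩

theorem covered_zero (X : Int) (A : List Int) : covered X A 0 = decide (X ≤ 0) := by
  have h := covered_eq X A 0
  simpa [cnt_zero] using h

-- for X ≤ 0 the bisection collapses to the empty prefix and B returns -1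
theorem alt_nonpos (X : Int) (A : List Int) (hX : X ≤ 0) : solution_alt X A = -1 := by
  have hcov0 : covered X A 0 = true := by rw [covered_zero]; simpa using hX
  have hcovn : covered X A ((A.length : Nat) : Int) = true := by
    rw [covered_eq]
    simpa using le_trans hX (by positivity)
  unfold solution_alt
  rw [if_neg (by simpa using hcovn)]
  obtain ⟨p1, _, _, p4⟩ := altGo_spec X A A.length 0 (A.length : Int)
    (le_refl 0) (by positivity) (by omega) hcovn
  have hr0 : altGo X A A.length 0 (A.length : Int) = 0 := by
    by_contra hne
    have : covered X A 0 = false := p4 0 (le_refl 0) (by omega)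
    rw [hcov0] at this
    cases this
  rw [hr0]
  norm_num

theorem prefSet_zero (X : Int) (A : List Int) : prefSet X A 0 = PySem.Set.empty := rfl

theorem contains_empty (v : Int) : PySem.Set.contains (PySem.Set.empty : PySem.Set Int) v = false := by
  cases h : PySem.Set.contains (PySem.Set.empty : PySem.Set Int) v
  · rfl
  · exact absurd ((PySem.Set.contains_iff _ _).1 h) (by simp [PySem.Set.empty])

-- ===== VERDICT (by name: the statements are the Claim_ definitions above) =====
theorem solution_spec : Claim_unchanged_solution := by
  intro X A _
  unfold Spec_solution
  intro hnD
  by_cases hcov : covered X A (A.length : Int) = true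
  · obtain ⟨p1, p2, p3, p4⟩ := altGo_spec X A A.length 0 (A.length : Int)
      (le_refl 0) (by positivity) (by omega) hcov
    by_cases hX : 1 ≤ X
    · -- main case: the least covered prefix length r is ≥ 1; A returns r - 1
      set r := altGo X A A.length 0 (A.length : Int) with hrdef
      have hr1 : 1 ≤ r := by
        by_contra hne
        have h0 : r = 0 := by omega
        rw [h0, covered_zero] at p3
        simp at p3
        omega
      have hrcast : ((r.toNat : Nat) : Int) = r := Int.toNat_of_nonneg p1
      have hhit : X ≤ (cnt X A r.toNat : Int) := by
        rw [← hrcast, covered_eq] at p3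
        simpa using p3
      have hminN : ∀ m : Nat, m < r.toNat → (cnt X A m : Int) < X := by
        intro m hm
        have := p4 (m : Int) (by positivity) (by omega)
        rw [covered_eq] at this
        simpa using this
      have hrle : r.toNat ≤ A.length := by omega
      have hA := goA2 X A r.toNat hrle hhit hminN A 0 (by simp) (by omega)
      unfold solution
      rw [show (PySem.List.enumerate A) = PySem.List.enumerate A ((0 : Nat) : Int) by norm_num,
        ← prefSet_zero X A] at *
      unfold solution_alt
      rw [if_neg (by simpa using hcov)]
      rw [← hrdef, hA, hrcast]
    · -- X ≤ 0 outside D_: both sides give -1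
      rw [alt_nonpos X A (by omega)]
      cases A with
      | nil => rfl
      | cons a as =>
        by_cases hX0 : X = 0
        · subst hX0
          have ha : a ≤ 0 := by
            by_contra hpos
            exact hnD ⟨rfl, by simp, by simp; omega⟩
          unfold solution
          rw [PySem.List.enumerate_cons]
          simp only [solutionGo, PySem.Set.len]
          rw [if_neg (by rw [contains_empty]; simp)]
          rw [if_pos ha]
          have hlen : (List.length (PySem.Set.add (PySem.Set.empty : PySem.Set Int) a) : Int) = 1 := by
            rw [length_add, if_neg (by simp [PySem.Set.empty])]
            simp [PySem.Set.empty]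
          rw [if_neg (by rw [hlen]; omega)]
          exact solutionGo_gt 0 _ _ (by rw [hlen]; omega)
        · unfold solution
          exact solutionGo_gt X _ _ (by simp [PySem.Set.empty]; omega)
  · -- the whole list never covers: both sides give -1
    have hcnt : (cnt X A A.length : Int) < X := by
      have := covered_eq X A A.length
      rw [this] at hcov
      simpa using hcov
    unfold solution_alt
    rw [if_pos (by simpa using hcov)]
    have hA := goA1 X A hcnt A 0 (by simp)
    unfold solution
    rw [show (PySem.List.enumerate A) = PySem.List.enumerate A ((0 : Nat) : Int) by norm_num,
      ← prefSet_zero X A]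
    exact hA

theorem solution_changed : Claim_changed_solution := by unfold Claim_changed_solution; decide

theorem solution_tight : Claim_exact_solution := by
  intro X A _ hD
  obtain ⟨hX0, hne, hhead⟩ := hD
  subst hX0
  cases A with
  | nil => exact absurd rfl hne
  | cons a as =>
    have ha : 0 < a := by simpa using hhead
    rw [alt_nonpos 0 (a :: as) (le_refl 0)]
    unfold solution
    rw [PySem.List.enumerate_cons]
    simp only [solutionGo, PySem.Set.len]
    rw [if_neg (by rw [contains_empty]; simp)]
    rw [if_neg (show ¬ a ≤ (0 : Int) by omega)]
    rw [if_pos (show ((List.length (PySem.Set.empty : PySem.Set Int) : Int) = 0) by simp [PySem.Set.empty])]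
    omega
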